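-- pv_equiv track=rewrite | github.com/Trach-barIlan/course-scheduler | backend/schedule/utils.py | count_hour_gaps
-- ===== SOURCE A (Python) =====
-- DAYS = ["Sun", "Mon", "Tue", "Wed", "Thu", "Fri", "Sat"]
--
-- def count_hour_gaps(time_slots):
--     sorted_slots = sorted(time_slots, key=lambda x: (DAYS.index(x[0]), x[1]))
--     gaps = 0
--     prev_day = None
--     prev_end = 0
--     for day, start, end in sorted_slots:
--         if day == prev_day and start > prev_end:
--             gaps += start - prev_end
--         prev_day = day
--         prev_end = end
--     return gaps
-- ===== SOURCE B (Python) =====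
-- DAYS = ["Sun", "Mon", "Tue", "Wed", "Thu", "Fri", "Sat"]
--
-- def count_hour_gaps(time_slots):
--     by_day = {}
--     for day, start, end in time_slots:
--         by_day.setdefault(day, []).append((start, end))
--     total = 0
--     for slots in by_day.values():
--         prev_end = None
--         for start, end in sorted(slots, key=lambda p: p[0]):
--             if prev_end is not None and start > prev_end:
--                 total += start - prev_end
--             prev_end = end
--     return total
-- ===== Notes on version B (the rewrite author's own statement) =====
-- stated objective: alternative
-- what changed: Replaces the single global sort keyed by the tuple (DAYS.index(day), start) and its day-change-tracking scan with a dict that groups slots per day in one pass; each day's group is then sorted by start alone and its gaps summed independently, so DAYS.index and the day-boundary bookkeeping disappear.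
import Mathlib
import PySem

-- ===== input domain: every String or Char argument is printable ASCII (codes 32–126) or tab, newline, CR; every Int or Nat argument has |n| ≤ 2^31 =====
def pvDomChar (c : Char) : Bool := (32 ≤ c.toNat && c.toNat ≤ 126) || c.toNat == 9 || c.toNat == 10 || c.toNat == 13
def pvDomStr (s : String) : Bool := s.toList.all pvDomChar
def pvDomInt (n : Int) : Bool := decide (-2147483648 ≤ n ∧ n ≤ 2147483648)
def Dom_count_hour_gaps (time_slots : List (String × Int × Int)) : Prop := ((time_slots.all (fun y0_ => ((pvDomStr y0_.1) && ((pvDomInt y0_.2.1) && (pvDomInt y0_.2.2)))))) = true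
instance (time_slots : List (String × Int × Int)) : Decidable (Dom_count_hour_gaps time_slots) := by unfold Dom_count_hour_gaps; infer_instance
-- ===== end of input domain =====

-- B replaces A's single global sort keyed by (DAYS.index(day), start) with a dict grouping
-- slots per day, sorting each day's group by start alone and summing gaps per group
-- (A raises ValueError on day names not in DAYS; those inputs are excluded by Pre_).

-- ===== PORT A =====
def pvDAYS : List String := ["Sun", "Mon", "Tue", "Wed", "Thu", "Fri", "Sat"]

-- DAYS.index(d); the `.getD 0` branch is unreachable under Pre_ (Python raises ValueError there)
def dayIdx (d : String) : Nat := (PySem.List.index? pvDAYS d).getD 0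

def count_hour_gaps (time_slots : List (String × Int × Int)) : Int :=
  let sorted_slots := PySem.List.sorted2 time_slots (fun x => dayIdx x.1) (fun x => x.2.1)
  (sorted_slots.foldl
    (fun st x =>
      (if some x.1 = st.2.1 ∧ st.2.2 < x.2.1 then st.1 + (x.2.1 - st.2.2) else st.1,
       some x.1, x.2.2))
    ((0 : Int), (none : Option String), (0 : Int))).1

-- ===== PORT B =====
def count_hour_gaps_alt (time_slots : List (String × Int × Int)) : Int :=
  let by_day : PySem.Dict String (List (Int × Int)) :=
    time_slots.foldl (fun d x => d.modify x.1 [] (fun l => l ++ [x.2])) PySem.Dict.empty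
  by_day.values.foldl
    (fun total slots =>
      ((PySem.List.sorted slots (fun p => p.1)).foldl
        (fun (st : Int × Option Int) p =>
          ((match st.2 with
            | some pe => if pe < p.1 then st.1 + (p.1 - pe) else st.1
            | none => st.1), some p.2))
        (total, none)).1)
    0

-- ===== PRECONDITION & SPEC =====
-- Pre_ excludes exactly the inputs where Python A raises ValueError (a day name not in DAYS).
def Pre_count_hour_gaps (time_slots : List (String × Int × Int)) : Prop :=
  ∀ x ∈ time_slots, x.1 ∈ pvDAYS
instance (time_slots : List (String × Int × Int)) : Decidable (Pre_count_hour_gaps time_slots) := by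
  unfold Pre_count_hour_gaps; infer_instance

def pvWitness_count_hour_gaps : (List (String × Int × Int)) :=
  [("Mon", 9, 10), ("Mon", 12, 13), ("Tue", 8, 9)]

def Spec_count_hour_gaps (time_slots : List (String × Int × Int)) (out : Int) : Prop :=
  out = count_hour_gaps_alt time_slots
instance (time_slots : List (String × Int × Int)) (out : Int) : Decidable (Spec_count_hour_gaps time_slots out) := by
  unfold Spec_count_hour_gaps; infer_instance

-- ===== CLAIM (what is proved, stated in full; the proofs are below) =====
def Claim_equal_count_hour_gaps : Prop := ∀ (time_slots : List (String × Int × Int)), Dom_count_hour_gaps time_slots → Pre_count_hour_gaps time_slots → Spec_count_hour_gaps time_slots (count_hour_gaps time_slots)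


-- ===== LEMMAS AND PROOFS =====

-- purely functional gap counters used by the proofs
def gaps1 : Option Int → List (Int × Int) → Int
  | _, [] => 0
  | pe, p :: t =>
      (match pe with
       | some q => if q < p.1 then p.1 - q else 0
       | none => 0) + gaps1 (some p.2) t

def gapsA : Option String → Int → List (String × Int × Int) → Int
  | _, _, [] => 0
  | pd, pe, x :: t =>
      (if some x.1 = pd ∧ pe < x.2.1 then x.2.1 - pe else 0) + gapsA (some x.1) x.2.2 t

def dayTerm (l : List (String × Int × Int)) (d : String) : Int :=
  gaps1 none ((l.filter (fun y => y.1 == d)).map (·.2))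

def bfA (a b : String × Int × Int) : Bool :=
  decide (dayIdx a.1 < dayIdx b.1) || (!decide (dayIdx b.1 < dayIdx a.1) && decide (a.2.1 < b.2.1))

def RelD (a b : String × Int × Int) : Prop := a.1 = b.1 ∨ dayIdx a.1 < dayIdx b.1

-- A's loop equals gapsA
theorem foldA_eq (l : List (String × Int × Int)) : ∀ (g : Int) (pd : Option String) (pe : Int),
    (l.foldl
      (fun st x =>
        (if some x.1 = st.2.1 ∧ st.2.2 < x.2.1 then st.1 + (x.2.1 - st.2.2) else st.1,
         some x.1, x.2.2))
      (g, pd, pe)).1 = g + gapsA pd pe l := by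
  induction l with
  | nil => intro g pd pe; simp [gapsA]
  | cons x t ih =>
    intro g pd pe
    simp only [List.foldl_cons, gapsA, ih]
    split_ifs <;> ring

-- B's inner loop equals gaps1
theorem foldB_eq (l : List (Int × Int)) : ∀ (g : Int) (pe : Option Int),
    (l.foldl
      (fun (st : Int × Option Int) p =>
        ((match st.2 with
          | some pe => if pe < p.1 then st.1 + (p.1 - pe) else st.1
          | none => st.1), some p.2))
      (g, pe)).1 = g + gaps1 pe l := by
  induction l with
  | nil => intro g pe; simp [gaps1]
  | cons p t ih =>
    intro g pe
    simp only [List.foldl_cons, gaps1, ih]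
    cases pe with
    | none => ring
    | some q =>
      show (if q < p.1 then g + (p.1 - q) else g) + gaps1 (some p.2) t
        = g + ((if q < p.1 then p.1 - q else 0) + gaps1 (some p.2) t)
      split_ifs <;> ring

theorem insertBy_cons {α : Type} (bf : α → α → Bool) (x y : α) (ys : List α) :
    PySem.List.insertBy bf x (y :: ys) =
      if bf x y then x :: y :: ys else y :: PySem.List.insertBy bf x ys := rfl

theorem filter_insertBy {α : Type} (bf : α → α → Bool) (p : α → Bool)
    (H : ∀ a b c, bf a b = true → bf c b = false → bf a c = true) (x : α) :
    ∀ l : List α, l.Pairwise (fun a b => bf b a = false) →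
    (PySem.List.insertBy bf x l).filter p
      = if p x then PySem.List.insertBy bf x (l.filter p) else l.filter p := by
  intro l
  induction l with
  | nil => intro _; by_cases hp : p x <;> simp [PySem.List.insertBy, hp]
  | cons y ys ih =>
    intro hpw
    have hyz := (List.pairwise_cons.mp hpw).1
    have hys := (List.pairwise_cons.mp hpw).2
    by_cases hxy : bf x y = true
    · rw [insertBy_cons, if_pos hxy]
      by_cases hp : p x
      · by_cases hpy : p y
        · simp [hp, hpy, insertBy_cons, hxy]
        · have hall : ∀ z ∈ ys.filter p, bf x z = true := by
            intro z hz
            exact H x y z hxy (hyz z (List.mem_of_mem_filter hz))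
          cases hfe : ys.filter p with
          | nil => simp [hp, hpy, hfe, PySem.List.insertBy]
          | cons z zs =>
            have hz : bf x z = true := hall z (by rw [hfe]; exact List.mem_cons_self)
            simp [hp, hpy, hfe, insertBy_cons, hz]
      · simp [List.filter_cons, hp]
    · have hxy' : bf x y = false := by simpa using hxy
      rw [insertBy_cons, hxy']
      simp only [Bool.false_eq_true, if_false]
      by_cases hpy : p y
      · rw [List.filter_cons_of_pos hpy, List.filter_cons_of_pos hpy, ih hys]
        by_cases hp : p x
        · rw [if_pos hp, if_pos hp, insertBy_cons, hxy']
          simp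
        · rw [if_neg hp, if_neg hp]
      · rw [List.filter_cons_of_neg hpy, List.filter_cons_of_neg hpy, ih hys]

theorem pairwise_insertBy {α : Type} (bf : α → α → Bool)
    (Hasym : ∀ a b, bf a b = true → bf b a = false)
    (Htr : ∀ a b c, bf a b = true → bf b c = true → bf a c = true) (x : α) :
    ∀ l : List α, l.Pairwise (fun a b => bf b a = false) →
    (PySem.List.insertBy bf x l).Pairwise (fun a b => bf b a = false) := by
  intro l
  induction l with
  | nil => intro _; simp [PySem.List.insertBy]
  | cons y ys ih =>
    intro hpw
    have hyz := (List.pairwise_cons.mp hpw).1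
    have hys := (List.pairwise_cons.mp hpw).2
    by_cases hxy : bf x y = true
    · rw [insertBy_cons, if_pos hxy]
      refine List.pairwise_cons.mpr ⟨?_, hpw⟩
      intro z hz
      rcases List.mem_cons.mp hz with rfl | hz'
      · exact Hasym _ _ hxy
      · by_contra hzx
        have hzx' : bf z x = true := by simpa using hzx
        have : bf z y = true := Htr _ _ _ hzx' hxy
        rw [hyz z hz'] at this
        exact Bool.false_ne_true this
    · have hxy' : bf x y = false := by simpa using hxy
      rw [insertBy_cons, hxy']
      simp only [Bool.false_eq_true, if_false]
      refine List.pairwise_cons.mpr ⟨?_, ih hys⟩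
      intro z hz
      rcases (PySem.List.mem_insertBy bf x z ys).mp hz with rfl | hz'
      · exact hxy'
      · exact hyz z hz'

theorem pairwise_foldl_insertBy {α : Type} (bf : α → α → Bool)
    (Hasym : ∀ a b, bf a b = true → bf b a = false)
    (Htr : ∀ a b c, bf a b = true → bf b c = true → bf a c = true) :
    ∀ (l acc : List α), acc.Pairwise (fun a b => bf b a = false) →
    (l.foldl (fun acc x => PySem.List.insertBy bf x acc) acc).Pairwise (fun a b => bf b a = false) := by
  intro l
  induction l with
  | nil => intro acc h; simpa using h
  | cons x t ih =>
    intro acc h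
    exact ih _ (pairwise_insertBy bf Hasym Htr x acc h)

theorem filter_foldl_insertBy {α : Type} (bf : α → α → Bool) (p : α → Bool)
    (H : ∀ a b c, bf a b = true → bf c b = false → bf a c = true)
    (Hasym : ∀ a b, bf a b = true → bf b a = false)
    (Htr : ∀ a b c, bf a b = true → bf b c = true → bf a c = true) :
    ∀ (l acc : List α), acc.Pairwise (fun a b => bf b a = false) →
    (l.foldl (fun acc x => PySem.List.insertBy bf x acc) acc).filter p
      = (l.filter p).foldl (fun acc x => PySem.List.insertBy bf x acc) (acc.filter p) := by
  intro l
  induction l with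
  | nil => intro acc _; simp
  | cons x t ih =>
    intro acc h
    simp only [List.foldl_cons]
    rw [ih _ (pairwise_insertBy bf Hasym Htr x acc h),
        filter_insertBy bf p H x acc h]
    by_cases hp : p x
    · rw [if_pos hp, List.filter_cons_of_pos hp, List.foldl_cons]
    · rw [if_neg hp, List.filter_cons_of_neg hp]

theorem insertBy_congr {α : Type} (bf bf2 : α → α → Bool) (x : α) :
    ∀ l : List α, (∀ y ∈ l, bf x y = bf2 x y) →
      PySem.List.insertBy bf x l = PySem.List.insertBy bf2 x l := by
  intro l
  induction l with
  | nil => intro _; rfl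
  | cons y ys ih =>
    intro h
    rw [insertBy_cons, insertBy_cons, h y (List.mem_cons_self),
        ih (fun z hz => h z (List.mem_cons_of_mem _ hz))]

theorem foldl_insertBy_congr {α : Type} (bf bf2 : α → α → Bool) :
    ∀ (l acc : List α),
      (∀ a, (a ∈ l ∨ a ∈ acc) → ∀ b, (b ∈ l ∨ b ∈ acc) → bf a b = bf2 a b) →
      l.foldl (fun acc x => PySem.List.insertBy bf x acc) acc
        = l.foldl (fun acc x => PySem.List.insertBy bf2 x acc) acc := by
  intro l
  induction l with
  | nil => intro acc _; rfl
  | cons x t ih =>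
    intro acc h
    simp only [List.foldl_cons]
    rw [insertBy_congr bf bf2 x acc
        (fun y hy => h x (Or.inl List.mem_cons_self) y (Or.inr hy))]
    exact ih _ (fun a ha b hb => by
      refine h a ?_ b ?_ <;>
        [rcases ha with ha | ha; rcases hb with hb | hb] <;>
        first
          | exact Or.inl (List.mem_cons_of_mem _ ‹_›)
          | (rcases (PySem.List.mem_insertBy bf2 x _ acc).mp ‹_› with rfl | h'
             · exact Or.inl List.mem_cons_self
             · exact Or.inr h'))

theorem insertBy_map {α β : Type} (f : α → β) (bf' : α → α → Bool) (bf : β → β → Bool)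
    (h : ∀ a b, bf' a b = bf (f a) (f b)) (x : α) :
    ∀ l : List α, (PySem.List.insertBy bf' x l).map f = PySem.List.insertBy bf (f x) (l.map f) := by
  intro l
  induction l with
  | nil => rfl
  | cons y ys ih =>
    rw [insertBy_cons, List.map_cons, insertBy_cons, ← h]
    by_cases hxy : bf' x y = true
    · simp [hxy]
    · have hxy' : bf' x y = false := by simpa using hxy
      simp [hxy', ih]

theorem foldl_insertBy_map {α β : Type} (f : α → β) (bf' : α → α → Bool) (bf : β → β → Bool)
    (h : ∀ a b, bf' a b = bf (f a) (f b)) :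
    ∀ (l acc : List α),
      (l.foldl (fun acc x => PySem.List.insertBy bf' x acc) acc).map f
        = (l.map f).foldl (fun acc y => PySem.List.insertBy bf y acc) (acc.map f) := by
  intro l
  induction l with
  | nil => intro acc; rfl
  | cons x t ih =>
    intro acc
    simp only [List.foldl_cons, List.map_cons, ih, insertBy_map f bf' bf h]

-- concrete facts about bfA / dayIdx
theorem bfA_iff (a b : String × Int × Int) :
    bfA a b = true ↔ (dayIdx a.1 < dayIdx b.1 ∨ (¬ dayIdx b.1 < dayIdx a.1 ∧ a.2.1 < b.2.1)) := by
  simp [bfA]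

theorem bfA_false_iff (a b : String × Int × Int) :
    bfA a b = false ↔ ¬ (dayIdx a.1 < dayIdx b.1 ∨ (¬ dayIdx b.1 < dayIdx a.1 ∧ a.2.1 < b.2.1)) := by
  rw [← Bool.not_eq_true, bfA_iff]

theorem bfA_asym : ∀ a b, bfA a b = true → bfA b a = false := by
  intro a b h
  rw [bfA_iff] at h; rw [bfA_false_iff]
  omega

theorem bfA_trans : ∀ a b c, bfA a b = true → bfA b c = true → bfA a c = true := by
  intro a b c h1 h2
  rw [bfA_iff] at h1 h2 ⊢
  omega

theorem bfA_cross : ∀ a b c, bfA a b = true → bfA c b = false → bfA a c = true := by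
  intro a b c h1 h2
  rw [bfA_iff] at h1 ⊢; rw [bfA_false_iff] at h2
  omega

theorem dayIdx_inj : ∀ a ∈ pvDAYS, ∀ b ∈ pvDAYS, dayIdx a = dayIdx b → a = b := by
  intro a ha b hb h
  fin_cases ha <;> fin_cases hb <;> revert h <;> decide

-- the sort in port A is the foldl-insertBy loop with comparison bfA
theorem sorted2_eq (ts : List (String × Int × Int)) :
    PySem.List.sorted2 ts (fun x => dayIdx x.1) (fun x => x.2.1)
      = ts.foldl (fun acc x => PySem.List.insertBy bfA x acc) [] := rfl

theorem gapsA_append : ∀ (u : List (String × Int × Int)) (pd : Option String) (pe : Int)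
    (v : List (String × Int × Int)),
    gapsA pd pe (u ++ v)
      = gapsA pd pe u
        + gapsA (u.foldl (fun _ x => some x.1) pd) (u.foldl (fun _ x => x.2.2) pe) v := by
  intro u
  induction u with
  | nil => intro pd pe v; simp [gapsA]
  | cons x u' ih =>
    intro pd pe v
    simp only [List.cons_append, gapsA, List.foldl_cons, ih]
    ring

theorem gapsA_same_day : ∀ (t : List (String × Int × Int)) (d : String) (pe : Int),
    (∀ y ∈ t, y.1 = d) → gapsA (some d) pe t = gaps1 (some pe) (t.map (·.2)) := by
  intro t
  induction t with
  | nil => intro d pe _; simp [gapsA, gaps1]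
  | cons y t' ih =>
    intro d pe h
    have hy : y.1 = d := h y List.mem_cons_self
    simp only [gapsA, List.map_cons, gaps1, hy]
    rw [ih d y.2.2 (fun z hz => h z (List.mem_cons_of_mem _ hz))]
    simp

theorem foldl_day_const : ∀ (b : List (String × Int × Int)) (d : String),
    (∀ y ∈ b, y.1 = d) → b.foldl (fun _ x => some x.1) (some d) = some d := by
  intro b
  induction b with
  | nil => intro d _; rfl
  | cons y b' ih =>
    intro d h
    have hy : y.1 = d := h y List.mem_cons_self
    simp only [List.foldl_cons, hy]
    exact ih d (fun z hz => h z (List.mem_cons_of_mem _ hz))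

-- PySem.Set helpers
theorem set_add_of_mem {s : List String} {y : String} (h : y ∈ s) : PySem.Set.add s y = s := by
  simp [PySem.Set.add, PySem.Set.contains, h]

theorem cons_foldl_add : ∀ (v : List String) (a : String) (s : List String), a ∉ v →
    v.foldl PySem.Set.add (a :: s) = a :: v.foldl PySem.Set.add s := by
  intro v
  induction v with
  | nil => intro a s _; rfl
  | cons y v' ih =>
    intro a s hnm
    have hya : y ≠ a := fun h => hnm (h ▸ List.mem_cons_self)
    have hstep : PySem.Set.add (a :: s) y = a :: PySem.Set.add s y := by
      simp only [PySem.Set.add, PySem.Set.contains, List.contains_cons]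
      have : (y == a) = false := by simpa using hya
      rw [this]
      simp only [Bool.false_or]
      split_ifs <;> rfl
    simp only [List.foldl_cons, hstep]
    exact ih a _ (fun h => hnm (List.mem_cons_of_mem _ h))

theorem foldl_add_const : ∀ (u : List String) (a : String),
    (∀ y ∈ u, y = a) → u.foldl PySem.Set.add [a] = [a] := by
  intro u
  induction u with
  | nil => intro a _; rfl
  | cons y u' ih =>
    intro a hu
    have hy : y = a := hu y List.mem_cons_self
    simp only [List.foldl_cons, hy, set_add_of_mem (List.mem_cons_self)]
    exact ih a (fun z hz => hu z (List.mem_cons_of_mem _ hz))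

theorem ofList_cons_group : ∀ (u v : List String) (a : String),
    (∀ y ∈ u, y = a) → a ∉ v →
    PySem.Set.ofList (a :: (u ++ v)) = a :: PySem.Set.ofList v := by
  intro u v a hu hv
  have h1 : PySem.Set.ofList (a :: (u ++ v)) = (u ++ v).foldl PySem.Set.add [a] := by
    simp [PySem.Set.ofList, PySem.Set.empty, PySem.Set.add, PySem.Set.contains]
  rw [h1, List.foldl_append, foldl_add_const u a hu]
  exact cons_foldl_add v a [] hv

theorem head_dropWhile {α : Type} (p : α → Bool) :
    ∀ (t : List α) (y0 : α) (r' : List α), t.dropWhile p = y0 :: r' → p y0 = false := by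
  intro t
  induction t with
  | nil => intro y0 r' h; simp [List.dropWhile] at h
  | cons x t' ih =>
    intro y0 r' h
    rw [List.dropWhile_cons] at h
    by_cases hx : p x = true
    · rw [if_pos hx] at h; exact ih y0 r' h
    · have hx' : p x = false := by simpa using hx
      rw [hx', if_neg (by simp)] at h
      cases h; exact hx'

-- the main decomposition of A's scan into per-day blocks
theorem decompA : ∀ (n : Nat) (l : List (String × Int × Int)), l.length ≤ n →
    l.Pairwise RelD → ∀ (pd : Option String) (pe : Int), (∀ x ∈ l, some x.1 ≠ pd) →
    gapsA pd pe l = ((PySem.Set.ofList (l.map (·.1))).map (dayTerm l)).sum := by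
  intro n
  induction n with
  | zero =>
    intro l hlen _ pd pe _
    have : l = [] := List.length_eq_zero_iff.mp (Nat.le_zero.mp hlen)
    subst this; simp [gapsA, PySem.Set.ofList, PySem.Set.empty]
  | succ n ih =>
    intro l hlen hpw pd pe hpd
    match l with
    | [] => simp [gapsA, PySem.Set.ofList, PySem.Set.empty]
    | x :: t =>
      have hxt := (List.pairwise_cons.mp hpw).1
      have hpt := (List.pairwise_cons.mp hpw).2
      set b := t.takeWhile (fun y => y.1 == x.1) with hbdef
      set r := t.dropWhile (fun y => y.1 == x.1) with hrdef
      have htbr : t = b ++ r := (List.takeWhile_append_dropWhile).symm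
      have hb : ∀ y ∈ b, y.1 = x.1 := by
        intro y hy
        have := List.mem_takeWhile_imp hy
        simpa using this
      have hsubr : r.Sublist t := by rw [hrdef]; exact List.dropWhile_sublist _
      have hr : ∀ z ∈ r, z.1 ≠ x.1 := by
        cases hre : r with
        | nil => intro z hz; exact absurd hz (by simp)
        | cons y0 r' =>
          have hy0 : y0.1 ≠ x.1 := by
            have := head_dropWhile (fun y => y.1 == x.1) t y0 r' (hrdef ▸ hre)
            simpa using this
          have hy0t : y0 ∈ t := hsubr.mem (hre ▸ List.mem_cons_self)
          have hxy0 : dayIdx x.1 < dayIdx y0.1 := by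
            rcases hxt y0 hy0t with h | h
            · exact absurd h.symm hy0
            · exact h
          have hpwr : r.Pairwise RelD := hpt.sublist hsubr
          intro z hz
          rcases List.mem_cons.mp hz with rfl | hz'
          · exact hy0
          · intro hzx
            have hy0z : RelD y0 z := ((List.pairwise_cons.mp (hre ▸ hpwr)).1) z hz'
            have hdz : dayIdx z.1 = dayIdx x.1 := by rw [hzx]
            rcases hy0z with h | h
            · exact hy0 (h ▸ hzx)
            · omega
      have hpd' : ∀ z ∈ r, some z.1 ≠ some x.1 := by
        intro z hz h
        exact hr z hz (Option.some_inj.mp h)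
      have hlenr : r.length ≤ n := by
        have h1 : r.length ≤ t.length := hsubr.length_le
        have h2 : t.length + 1 ≤ n + 1 := by simpa using hlen
        omega
      have hIH := ih r hlenr (hpt.sublist hsubr) (some x.1) (b.foldl (fun _ y => y.2.2) x.2.2) hpd'
      -- left side
      have hL : gapsA pd pe (x :: t)
          = gaps1 (some x.2.2) (b.map (·.2))
            + gapsA (some x.1) (b.foldl (fun _ y => y.2.2) x.2.2) r := by
        have hcond : ¬ (some x.1 = pd ∧ pe < x.2.1) := by
          intro h; exact hpd x List.mem_cons_self h.1
        rw [show gapsA pd pe (x :: t)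
              = (if some x.1 = pd ∧ pe < x.2.1 then x.2.1 - pe else 0) + gapsA (some x.1) x.2.2 t
            from rfl,
            if_neg hcond, htbr, gapsA_append, foldl_day_const b x.1 hb,
            gapsA_same_day b x.1 x.2.2 hb]
        ring
      -- filter facts
      have hfilx : (x :: t).filter (fun y => y.1 == x.1) = x :: b := by
        rw [htbr, List.filter_cons_of_pos (by simp), List.filter_append]
        have h1 : b.filter (fun y => y.1 == x.1) = b :=
          List.filter_eq_self.mpr (fun y hy => by simp [hb y hy])
        have h2 : r.filter (fun y => y.1 == x.1) = [] :=
          List.filter_eq_nil_iff.mpr (fun z hz => by simp [hr z hz])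
        rw [h1, h2, List.append_nil]
      have hfilr : ∀ d, d ∈ r.map (·.1) → (x :: t).filter (fun y => y.1 == d) = r.filter (fun y => y.1 == d) := by
        intro d hd
        rcases List.mem_map.mp hd with ⟨z, hz, rfl⟩
        have hdx : x.1 ≠ z.1 := fun h => hr z hz h.symm
        rw [htbr, List.filter_cons_of_neg (by simp [hdx]), List.filter_append]
        have h1 : b.filter (fun y => y.1 == z.1) = [] :=
          List.filter_eq_nil_iff.mpr (fun y hy => by
            have := hb y hy
            simp [this, hdx])
        rw [h1, List.nil_append]
      -- set decomposition
      have hset : PySem.Set.ofList ((x :: t).map (·.1)) = x.1 :: PySem.Set.ofList (r.map (·.1)) := by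
        rw [htbr]
        have : (x :: (b ++ r)).map (·.1) = x.1 :: ((b.map (·.1)) ++ (r.map (·.1))) := by
          simp
        rw [this]
        refine ofList_cons_group (b.map (·.1)) (r.map (·.1)) x.1 ?_ ?_
        · intro y hy
          rcases List.mem_map.mp hy with ⟨z, hz, rfl⟩
          exact hb z hz
        · intro h
          rcases List.mem_map.mp h with ⟨z, hz, h'⟩
          exact hr z hz h'
      -- day terms agree between l and r for days of r
      have hterms : ∀ d ∈ PySem.Set.ofList (r.map (·.1)), dayTerm (x :: t) d = dayTerm r d := by
        intro d hd
        have hd' : d ∈ r.map (·.1) := (PySem.Set.mem_ofList _ _).mp hd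
        unfold dayTerm
        rw [hfilr d hd']
      have hterm_x : dayTerm (x :: t) x.1 = gaps1 (some x.2.2) (b.map (·.2)) := by
        unfold dayTerm
        rw [hfilx]
        simp [gaps1]
      rw [hL, hIH, hset, List.map_cons, List.sum_cons, hterm_x,
          List.map_congr_left hterms]

-- characterisation of A under Pre_
theorem A_char (ts : List (String × Int × Int)) (hpre : Pre_count_hour_gaps ts) :
    count_hour_gaps ts
      = ((PySem.Set.ofList ((PySem.List.sorted2 ts (fun x => dayIdx x.1) (fun x => x.2.1)).map (·.1))).map
          (dayTerm (PySem.List.sorted2 ts (fun x => dayIdx x.1) (fun x => x.2.1)))).sum := by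
  have hS := sorted2_eq ts
  have hmem : ∀ z ∈ PySem.List.sorted2 ts (fun x => dayIdx x.1) (fun x => x.2.1), z ∈ ts := by
    intro z hz
    exact (PySem.List.sorted2_perm ts _ _ false).mem_iff.mp hz
  have hpwbf : (PySem.List.sorted2 ts (fun x => dayIdx x.1) (fun x => x.2.1)).Pairwise
      (fun a b => bfA b a = false) := by
    rw [hS]
    exact pairwise_foldl_insertBy bfA bfA_asym bfA_trans ts [] (by simp)
  have hpw : (PySem.List.sorted2 ts (fun x => dayIdx x.1) (fun x => x.2.1)).Pairwise RelD := by
    refine hpwbf.imp_of_mem ?_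
    intro a b ha hb h
    rw [bfA_false_iff] at h
    unfold RelD
    by_cases hlt : dayIdx a.1 < dayIdx b.1
    · exact Or.inr hlt
    · left
      exact dayIdx_inj a.1 (hpre a (hmem a ha)) b.1 (hpre b (hmem b hb)) (by omega)
  unfold count_hour_gaps
  rw [foldA_eq]
  rw [decompA ((PySem.List.sorted2 ts (fun x => dayIdx x.1) (fun x => x.2.1)).length) _ le_rfl hpw none 0
       (by intro x _; simp)]
  simp

-- the per-day term equals B's per-group computation
theorem dayTerm_sorted (ts : List (String × Int × Int)) (d : String) :
    dayTerm (PySem.List.sorted2 ts (fun x => dayIdx x.1) (fun x => x.2.1)) d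
      = gaps1 none
          (PySem.List.sorted ((ts.filter (fun p => p.1 == d)).map (·.2)) (fun p => p.1)) := by
  unfold dayTerm
  rw [sorted2_eq]
  rw [filter_foldl_insertBy bfA (fun y => y.1 == d) bfA_cross bfA_asym bfA_trans ts [] (by simp)]
  simp only [List.filter_nil]
  have hsame : ∀ a, a ∈ ts.filter (fun y => y.1 == d) ∨ a ∈ ([] : List (String × Int × Int)) →
      ∀ b, b ∈ ts.filter (fun y => y.1 == d) ∨ b ∈ ([] : List (String × Int × Int)) →
      bfA a b = (fun a b : String × Int × Int => decide (a.2.1 < b.2.1)) a b := by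
    intro a ha b hb
    have hda : a.1 = d := by
      rcases ha with ha | ha
      · simpa using (List.mem_filter.mp ha).2
      · simp at ha
    have hdb : b.1 = d := by
      rcases hb with hb | hb
      · simpa using (List.mem_filter.mp hb).2
      · simp at hb
    simp [bfA, hda, hdb]
  rw [foldl_insertBy_congr bfA (fun a b => decide (a.2.1 < b.2.1)) (ts.filter (fun y => y.1 == d)) [] hsame]
  rw [foldl_insertBy_map (fun x : String × Int × Int => x.2)
        (fun a b : String × Int × Int => decide (a.2.1 < b.2.1))
        (fun a b : Int × Int => decide (a.1 < b.1)) (fun a b => rfl)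
        (ts.filter (fun y => y.1 == d)) []]
  rw [PySem.List.sorted_eq_foldl_insertBy]
  rfl

-- characterisation of B
theorem B_char (ts : List (String × Int × Int)) :
    count_hour_gaps_alt ts
      = ((PySem.Set.ofList (ts.map (·.1))).map
          (fun d => gaps1 none
            (PySem.List.sorted ((ts.filter (fun p => p.1 == d)).map (·.2)) (fun p => p.1)))).sum := by
  have halt : count_hour_gaps_alt ts
      = ((ts.foldl (fun d x => d.modify x.1 [] (fun l => l ++ [x.2])) PySem.Dict.empty).values).foldl
          (fun total slots =>
            ((PySem.List.sorted slots (fun p => p.1)).foldl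
              (fun (st : Int × Option Int) p =>
                ((match st.2 with
                  | some pe => if pe < p.1 then st.1 + (p.1 - pe) else st.1
                  | none => st.1), some p.2))
              (total, none)).1)
          0 := rfl
  rw [halt]
  have hkeys : (ts.foldl (fun d x => d.modify x.1 [] (fun l => l ++ [x.2])) PySem.Dict.empty).keys
      = PySem.Set.ofList (ts.map (·.1)) := by
    rw [show (fun (d : PySem.Dict String (List (Int × Int))) (x : String × Int × Int) =>
          d.modify x.1 [] (fun l => l ++ [x.2]))
        = (fun d x => d.modify ((fun y : String × Int × Int => y.1) x) [] ((fun (_ : PySem.Dict String (List (Int × Int))) (x : String × Int × Int) (l : List (Int × Int)) => l ++ [x.2]) d x)) from rfl]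
    rw [PySem.Dict.keys_foldl_modify_key ts (fun y => y.1) [] _ PySem.Dict.empty]
    rfl
  have hnodup : (ts.foldl (fun d x => d.modify x.1 [] (fun l => l ++ [x.2])) PySem.Dict.empty).keys.Nodup := by
    rw [hkeys]; exact PySem.Set.nodup_ofList _
  rw [PySem.Dict.values_eq_map_keys _ hnodup []]
  rw [PySem.List.foldl_congr_mem' _ _
        (fun total slots => total + gaps1 none (PySem.List.sorted slots (fun p => p.1))) 0
        (fun slots _ total => foldB_eq _ total none)]
  rw [PySem.List.foldl_add, List.map_map, hkeys, zero_add]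
  congr 1
  refine List.map_congr_left ?_
  intro d _
  simp only [Function.comp_apply]
  rw [PySem.Dict.getD_foldl_modify_append ts PySem.Dict.empty d]
  rfl

-- ===== VERDICT (by name: the statement is the Claim_ definition above) =====
theorem count_hour_gaps_spec : Claim_equal_count_hour_gaps := by
  intro ts _ hpre
  unfold Spec_count_hour_gaps
  rw [A_char ts hpre, B_char ts]
  have hperm : ((PySem.List.sorted2 ts (fun x => dayIdx x.1) (fun x => x.2.1)).map (·.1)).Perm
      (ts.map (·.1)) := (PySem.List.sorted2_perm ts _ _ false).map _
  have hpermset : (PySem.Set.ofList ((PySem.List.sorted2 ts (fun x => dayIdx x.1) (fun x => x.2.1)).map (·.1))).Perm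
      (PySem.Set.ofList (ts.map (·.1))) := by
    refine (List.perm_ext_iff_of_nodup (PySem.Set.nodup_ofList _) (PySem.Set.nodup_ofList _)).mpr ?_
    intro a
    rw [PySem.Set.mem_ofList, PySem.Set.mem_ofList]
    exact hperm.mem_iff
  calc ((PySem.Set.ofList ((PySem.List.sorted2 ts (fun x => dayIdx x.1) (fun x => x.2.1)).map (·.1))).map
          (dayTerm (PySem.List.sorted2 ts (fun x => dayIdx x.1) (fun x => x.2.1)))).sum
      = ((PySem.Set.ofList (ts.map (·.1))).map
          (dayTerm (PySem.List.sorted2 ts (fun x => dayIdx x.1) (fun x => x.2.1)))).sum :=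
        (hpermset.map _).sum_eq
    _ = _ := by
        congr 1
        refine List.map_congr_left ?_
        intro d _
        exact dayTerm_sorted ts d
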